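-- pv_equiv track=rewrite | github.com/ICPSwap-Labs/openclaw-icpswap-plugin | scripts/query_icpswap.py | pair_matches
-- ===== SOURCE A (Python) =====
-- from typing import Any, Optional
--
-- def normalize(value: Any) -> str:
--     if value is None:
--         return ""
--     return str(value).strip().lower()
--
-- def tokenize(value: str) -> list[str]:
--     cleaned = value.replace("/", " ").replace("-", " ")
--     return [part for part in (normalize(piece) for piece in cleaned.split()) if part]
--
-- def pool_pair(pool: dict[str, Any]) -> str:
--     return f'{pool.get("token0Symbol", "")}/{pool.get("token1Symbol", "")}'
--
-- def pool_terms(pool: dict[str, Any]) -> set[str]: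
--     terms = {
--         normalize(pool.get("poolId")),
--         normalize(pool.get("token0Symbol")),
--         normalize(pool.get("token1Symbol")),
--         normalize(pool.get("token0Name")),
--         normalize(pool.get("token1Name")),
--         normalize(pool.get("token0LedgerId")),
--         normalize(pool.get("token1LedgerId")),
--         normalize(pool_pair(pool)),
--     }
--     return {term for term in terms if term}
--
-- def pair_matches(pool: dict[str, Any], pair: str) -> tuple[bool, int]:
--     parts = [part for part in tokenize(pair) if part]
--     if len(parts) != 2:
--         return False, 0
--
--     symbols = [normalize(pool.get("token0Symbol")), normalize(pool.get("token1Symbol"))]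
--     names = [normalize(pool.get("token0Name")), normalize(pool.get("token1Name"))]
--     ledgers = [normalize(pool.get("token0LedgerId")), normalize(pool.get("token1LedgerId"))]
--     exact_terms = set(symbols + names + ledgers)
--
--     if parts[0] in exact_terms and parts[1] in exact_terms:
--         return True, 100
--
--     text = " ".join(sorted(pool_terms(pool)))
--     if all(part in text for part in parts):
--         return True, 60
--
--     return False, 0
-- ===== SOURCE B (Python) =====
-- from typing import Any, Optional
--
--
-- def normalize(value: Any) -> str:
--     if value is None:
--         return ""
--     return str(value).strip().lower()
--
--
-- def tokenize(value: str) -> list[str]: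
--     cleaned = value.replace("/", " ").replace("-", " ")
--     return [part for part in (normalize(piece) for piece in cleaned.split()) if part]
--
--
-- def pool_pair(pool: dict[str, Any]) -> str:
--     return f'{pool.get("token0Symbol", "")}/{pool.get("token1Symbol", "")}'
--
--
-- def pool_terms(pool: dict[str, Any]) -> set[str]:
--     terms = {
--         normalize(pool.get("poolId")),
--         normalize(pool.get("token0Symbol")),
--         normalize(pool.get("token1Symbol")),
--         normalize(pool.get("token0Name")),
--         normalize(pool.get("token1Name")),
--         normalize(pool.get("token0LedgerId")),
--         normalize(pool.get("token1LedgerId")),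
--         normalize(pool_pair(pool)),
--     }
--     return {term for term in terms if term}
--
--
-- def pair_matches(pool: dict[str, Any], pair: str) -> tuple[bool, int]:
--     parts = tokenize(pair)
--     if len(parts) != 2:
--         return False, 0
--     first, second = parts
--
--     exact_terms = {
--         normalize(pool.get(k))
--         for k in ("token0Symbol", "token1Symbol", "token0Name",
--                   "token1Name", "token0LedgerId", "token1LedgerId")
--     }
--     if first in exact_terms and second in exact_terms:
--         return True, 100
--
--     terms = pool_terms(pool)
--     if all(any(part in term for term in terms) for part in parts):
--         return True, 60
--
--     return False, 0
-- ===== Notes on version B (the rewrite author's own statement) =====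
-- stated objective: alternative
-- what changed: Tier-2 fuzzy matching no longer sorts the pool terms and joins them into one space-separated text for substring search; B tests each pair part directly against each pool term with a nested any/all substring loop (valid because tokenized parts contain no whitespace), and also drops the redundant second filter of parts and the three intermediate lists concatenated into the exact-term set.
import Mathlib
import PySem

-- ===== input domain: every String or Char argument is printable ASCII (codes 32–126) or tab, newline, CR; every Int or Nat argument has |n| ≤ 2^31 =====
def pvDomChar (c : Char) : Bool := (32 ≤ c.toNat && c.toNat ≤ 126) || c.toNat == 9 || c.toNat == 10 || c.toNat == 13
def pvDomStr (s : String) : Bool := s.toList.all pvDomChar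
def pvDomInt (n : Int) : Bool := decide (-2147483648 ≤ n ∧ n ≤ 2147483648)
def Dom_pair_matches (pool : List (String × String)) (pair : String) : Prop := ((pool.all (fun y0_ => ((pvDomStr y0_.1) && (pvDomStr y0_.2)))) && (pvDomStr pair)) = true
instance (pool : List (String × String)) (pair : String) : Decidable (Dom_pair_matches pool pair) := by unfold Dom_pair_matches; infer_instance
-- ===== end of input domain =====

-- B replaces A's sort-join-then-substring tier-2 scan by a direct nested any/all substring test
-- over the term set (valid because tokenized parts contain no whitespace): an alternative,
-- structurally different formulation of the same matcher, not claimed faster.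

-- ===== PORT A =====
-- shared module helpers (identical source in Source A and Source B)
def pvNormalize (v : Option String) : String :=
  match v with
  | none => ""
  | some s => PySem.Str.lower (PySem.Str.strip s)

def pvTokenize (value : String) : List String :=
  let cleaned := PySem.Str.replace (PySem.Str.replace value "/" " ") "-" " "
  ((PySem.Str.split₀ cleaned).map (fun piece => pvNormalize (some piece))).filter
    (fun part => !(part == ""))

def pvPoolPair (d : PySem.Dict String String) : String :=
  d.getD "token0Symbol" "" ++ "/" ++ d.getD "token1Symbol" ""

def pvPoolTerms (pool : List (String × String)) : List String :=
  let d : PySem.Dict String String := PySem.Dict.mk pool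
  (PySem.Set.ofList
    [pvNormalize (d.get? "poolId"), pvNormalize (d.get? "token0Symbol"),
     pvNormalize (d.get? "token1Symbol"), pvNormalize (d.get? "token0Name"),
     pvNormalize (d.get? "token1Name"), pvNormalize (d.get? "token0LedgerId"),
     pvNormalize (d.get? "token1LedgerId"), pvNormalize (some (pvPoolPair d))]).filter
    (fun t => !(t == ""))

def pair_matches (pool : List (String × String)) (pair : String) : Bool × Int :=
  let parts := (pvTokenize pair).filter (fun part => !(part == ""))
  if parts.length ≠ 2 then (false, 0)
  else
    let d : PySem.Dict String String := PySem.Dict.mk pool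
    let symbols := [pvNormalize (d.get? "token0Symbol"), pvNormalize (d.get? "token1Symbol")]
    let names := [pvNormalize (d.get? "token0Name"), pvNormalize (d.get? "token1Name")]
    let ledgers := [pvNormalize (d.get? "token0LedgerId"), pvNormalize (d.get? "token1LedgerId")]
    let exactTerms := PySem.Set.ofList (symbols ++ names ++ ledgers)
    if PySem.Set.contains exactTerms (PySem.List.pyGetD parts 0 "") &&
       PySem.Set.contains exactTerms (PySem.List.pyGetD parts 1 "") then (true, 100)
    else
      let text := PySem.Str.join " " (PySem.List.sorted (pvPoolTerms pool) (fun x => x) false)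
      if parts.all (fun part => PySem.Str.isIn part text) then (true, 60)
      else (false, 0)

-- ===== PORT B =====
def pair_matches_alt (pool : List (String × String)) (pair : String) : Bool × Int :=
  match pvTokenize pair with
  | [first, second] =>
    let d : PySem.Dict String String := PySem.Dict.mk pool
    let exactTerms := PySem.Set.ofList
      (["token0Symbol", "token1Symbol", "token0Name",
        "token1Name", "token0LedgerId", "token1LedgerId"].map
        (fun k => pvNormalize (d.get? k)))
    if PySem.Set.contains exactTerms first && PySem.Set.contains exactTerms second then (true, 100)
    else
      let terms := pvPoolTerms pool
      if [first, second].all (fun part => terms.any (fun term => PySem.Str.isIn part term)) then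
        (true, 60)
      else (false, 0)
  | _ => (false, 0)

-- ===== PRECONDITION & SPEC =====
def Spec_pair_matches (pool : List (String × String)) (pair : String) (out : Bool × Int) : Prop := out = pair_matches_alt pool pair
instance (pool : List (String × String)) (pair : String) (out : Bool × Int) : Decidable (Spec_pair_matches pool pair out) := by unfold Spec_pair_matches; infer_instance

-- ===== CLAIM (what is proved, stated in full; the proofs are below) =====
def Claim_equal_pair_matches : Prop := ∀ (pool : List (String × String)) (pair : String), Dom_pair_matches pool pair → Spec_pair_matches pool pair (pair_matches pool pair)

-- ===== LEMMAS AND PROOFS =====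

-- a whitespace-free list is a prefix of `a ++ c :: b` only within `a`
theorem pv_prefix_append_cons {α : Type} (c : α) (p a b : List α) (hc : c ∉ p)
    (h : p <+: a ++ c :: b) : p <+: a := by
  induction a generalizing p with
  | nil =>
    cases p with
    | nil => exact List.nil_prefix
    | cons x p' =>
      rw [List.nil_append, List.cons_prefix_cons] at h
      rcases h with ⟨rfl, -⟩
      exact absurd (List.mem_cons_self ..) hc
  | cons x a' ih =>
    cases p with
    | nil => exact List.nil_prefix
    | cons y p' =>
      rw [List.cons_append, List.cons_prefix_cons] at h
      rcases h with ⟨rfl, h2⟩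
      exact List.cons_prefix_cons.mpr
        ⟨rfl, ih p' (fun hm => hc (List.mem_cons_of_mem _ hm)) h2⟩

-- a list missing `c` is an infix of `a ++ c :: b` iff it is an infix of a side
theorem pv_infix_append_cons_iff {α : Type} (c : α) (p a b : List α) (hc : c ∉ p) :
    p <:+: a ++ c :: b ↔ p <:+: a ∨ p <:+: b := by
  constructor
  · intro h
    induction a with
    | nil =>
      rw [List.nil_append, List.infix_cons_iff] at h
      rcases h with h | h
      · left
        have := pv_prefix_append_cons c p [] b hc (by simpa using h)
        simp [List.prefix_nil.mp this]
      · exact Or.inr h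
    | cons x a' ih =>
      rw [List.cons_append, List.infix_cons_iff] at h
      rcases h with h | h
      · exact Or.inl (pv_prefix_append_cons c p (x :: a') b hc h).isInfix
      · rcases ih h with h' | h'
        · exact Or.inl (List.infix_cons h')
        · exact Or.inr h'
  · rintro (h | h)
    · exact h.trans (List.infix_append_left ..)
    · exact h.trans ((List.suffix_cons c b).isInfix.trans (List.infix_append_right ..))

-- a nonempty space-free list is inside a space-join iff it is inside one joined piece
theorem pv_infix_join_space (p : List Char) (hne : p ≠ []) (hsp : ' ' ∉ p) :
    ∀ L : List (List Char), p <:+: PySem.Chars.join [' '] L ↔ ∃ t ∈ L, p <:+: t := by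
  intro L
  induction L with
  | nil => simp [PySem.Chars.join_nil, List.infix_nil, hne]
  | cons t rest ih =>
    cases rest with
    | nil => simp [PySem.Chars.join_singleton]
    | cons u rest' =>
      rw [PySem.Chars.join_cons_cons,
        show t ++ [' '] ++ PySem.Chars.join [' '] (u :: rest')
          = t ++ ' ' :: PySem.Chars.join [' '] (u :: rest') by simp,
        pv_infix_append_cons_iff ' ' p _ _ hsp, ih]
      constructor
      · rintro (h | ⟨s, hs, h⟩)
        · exact ⟨t, by simp, h⟩
        · exact ⟨s, List.mem_cons_of_mem _ hs, h⟩
      · rintro ⟨s, hs, h⟩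
        rcases List.mem_cons.mp hs with rfl | hs
        · exact Or.inl h
        · exact Or.inr ⟨s, hs, h⟩

-- every piece produced by str.split() is whitespace-free
theorem pv_split₀_go_no_space : ∀ (s cur : List Char) (acc : List (List Char)),
    (∀ c ∈ cur, PySem.Chars.isspace c = false) →
    (∀ q ∈ acc, ∀ c ∈ q, PySem.Chars.isspace c = false) →
    ∀ q ∈ PySem.Chars.split₀.go s cur acc, ∀ c ∈ q, PySem.Chars.isspace c = false := by
  intro s
  induction s with
  | nil =>
    intro cur acc hcur hacc q hq
    simp only [PySem.Chars.split₀.go] at hq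
    split at hq
    · exact hacc q (List.mem_reverse.mp hq)
    · rcases List.mem_cons.mp (List.mem_reverse.mp hq) with rfl | hq'
      · intro c hcm; exact hcur c (List.mem_reverse.mp hcm)
      · exact hacc q hq'
  | cons ch rest ih =>
    intro cur acc hcur hacc q hq
    simp only [PySem.Chars.split₀.go] at hq
    split at hq
    · split at hq
      · exact ih [] acc (by simp) hacc q hq
      · refine ih [] (cur.reverse :: acc) (by simp) ?_ q hq
        intro q' hq'
        rcases List.mem_cons.mp hq' with rfl | hq''
        · intro c hcm; exact hcur c (List.mem_reverse.mp hcm)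
        · exact hacc q' hq''
    · refine ih (ch :: cur) acc ?_ hacc q hq
      intro c hcm
      rcases List.mem_cons.mp hcm with rfl | hcm'
      · rename_i hsp; exact Bool.eq_false_iff.mpr hsp
      · exact hcur c hcm'

theorem pv_mem_split₀_no_space (cs q : List Char) (hq : q ∈ PySem.Chars.split₀ cs) :
    ∀ c ∈ q, PySem.Chars.isspace c = false := by
  unfold PySem.Chars.split₀ at hq
  exact pv_split₀_go_no_space cs [] [] (by simp) (by simp) q hq

theorem pv_lowerChar_space (c : Char) (h : PySem.Chars.lowerChar c = ' ') : c = ' ' := by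
  unfold PySem.Chars.lowerChar at h
  split at h
  · exfalso
    rename_i hup
    have hb : 65 ≤ c.toNat ∧ c.toNat ≤ 90 := by
      simp [PySem.Chars.isupper, Char.le_def] at hup
      exact ⟨hup.1, hup.2⟩
    have h32 : (Char.ofNat (c.toNat + 32)).toNat = c.toNat + 32 := by
      unfold Char.ofNat
      split
      · rfl
      · rename_i hv; exact absurd (Or.inl (by omega)) hv
    have := congrArg Char.toNat h
    rw [h32] at this
    simp only [show (' ').toNat = 32 from rfl] at this
    omega
  · exact h

theorem pv_mem_strip (c : Char) (cs : List Char) (h : c ∈ PySem.Chars.strip cs) : c ∈ cs := by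
  unfold PySem.Chars.strip PySem.Chars.rstrip PySem.Chars.lstrip at h
  have h1 := List.mem_reverse.mp h
  have h2 := List.mem_reverse.mp ((List.dropWhile_sublist _).mem h1)
  exact (List.dropWhile_sublist _).mem h2

-- every token produced by pvTokenize is nonempty and contains no space
theorem pv_tokenize_part (v p : String) (hp : p ∈ pvTokenize v) :
    p ≠ "" ∧ ' ' ∉ p.toList := by
  simp only [pvTokenize] at hp
  obtain ⟨hmem, hneb⟩ := List.mem_filter.mp hp
  have hne : p ≠ "" := by simpa using hneb
  refine ⟨hne, ?_⟩
  rcases List.mem_map.mp hmem with ⟨piece, hpiece, rfl⟩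
  unfold PySem.Str.split₀ at hpiece
  rcases List.mem_map.mp hpiece with ⟨q, hq, rfl⟩
  intro hsp
  simp only [pvNormalize, PySem.Str.toList_lower, PySem.Str.toList_strip,
    String.toList_ofList] at hsp
  rcases List.mem_map.mp hsp with ⟨c, hcm, hcl⟩
  have hc := pv_lowerChar_space c hcl
  subst hc
  have hcq := pv_mem_strip ' ' q hcm
  have hfalse := pv_mem_split₀_no_space _ q hq ' ' hcq
  exact absurd hfalse (by decide)

theorem pv_part_text (pool : List (String × String)) (p : String)
    (hne : p ≠ "") (hsp : ' ' ∉ p.toList) :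
    PySem.Str.isIn p
      (PySem.Str.join " " (PySem.List.sorted (pvPoolTerms pool) (fun x => x) false)) =
    (pvPoolTerms pool).any (fun term => PySem.Str.isIn p term) := by
  have hne' : p.toList ≠ [] := fun h => hne (String.toList_eq_nil_iff.mp h)
  have hj := pv_infix_join_space p.toList hne' hsp
  refine Bool.coe_iff_coe.mp ?_
  rw [PySem.Str.isIn_iff_infix, List.any_eq_true]
  have htext : (PySem.Str.join " "
      (PySem.List.sorted (pvPoolTerms pool) (fun x => x) false)).toList
      = PySem.Chars.join [' ']
        ((PySem.List.sorted (pvPoolTerms pool) (fun x => x) false).map String.toList) := by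
    simp [PySem.Str.join, String.toList_ofList]
  rw [htext, hj]
  constructor
  · rintro ⟨t, ht, h⟩
    rcases List.mem_map.mp ht with ⟨s, hs, rfl⟩
    exact ⟨s, (PySem.List.sorted_perm (pvPoolTerms pool) (fun x => x) false).subset hs,
      (PySem.Str.isIn_iff_infix p s).mpr h⟩
  · rintro ⟨s, hs, h⟩
    exact ⟨s.toList,
      List.mem_map.mpr ⟨s,
        ((PySem.List.sorted_perm (pvPoolTerms pool) (fun x => x) false).mem_iff).mpr hs, rfl⟩,
      (PySem.Str.isIn_iff_infix p s).mp h⟩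

theorem pv_main (pool : List (String × String)) (pair : String) :
    pair_matches pool pair = pair_matches_alt pool pair := by
  have hall : ∀ x ∈ pvTokenize pair, x ≠ "" ∧ ' ' ∉ x.toList :=
    fun x hx => pv_tokenize_part pair x hx
  have hfilt : (pvTokenize pair).filter (fun part => !(part == "")) = pvTokenize pair :=
    List.filter_eq_self.mpr (fun x hx => by simpa using (pv_tokenize_part pair x hx).1)
  simp only [pair_matches, pair_matches_alt, hfilt]
  rcases htok : pvTokenize pair with _ | ⟨a, _ | ⟨b, _ | ⟨c, t⟩⟩⟩
  · simp
  · simp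
  · rw [htok] at hall
    have ha := hall a (by simp)
    have hb := hall b (by simp)
    have h1 : PySem.List.pyGetD [a, b] 1 "" = b := by
      rw [PySem.List.pyGetD_eq_getElem] <;> simp
    simp only [h1, List.length_cons, List.length_nil, List.map, List.cons_append,
      List.nil_append, List.all_cons, List.all_nil,
      pv_part_text pool a ha.1 ha.2, pv_part_text pool b hb.1 hb.2]
    norm_num
  · simp [List.length_cons]

-- ===== VERDICT (by name: the statement is the Claim_ definition above) =====
theorem pair_matches_spec : Claim_equal_pair_matches := by
  intro pool pair _
  unfold Spec_pair_matches
  exact pv_main pool pair
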